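-- pv_equiv track=rewrite | github.com/kiryong-lee/Algorithm | programmers/64063.py | solution
-- ===== SOURCE A (Python) =====
-- def solution(k, room_number):
--     room_dict = dict()
--     answer = []
--     for room in room_number:
--         if room not in room_dict:
--             room_dict[room] = room + 1
--             answer.append(room)
--         else:
--             update_list = []
--             while room in room_dict:
--                 update_list.append(room)
--                 room = room_dict[room]
--
--             for update in update_list:
--                 room_dict[update] = room + 1
--             room_dict[room] = room + 1
--
--             answer.append(room)
--
--     return answer
-- ===== SOURCE B (Python) =====
-- def solution(k, room_number):
--     occupied = set()
--     answer = []
--     for room in room_number: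
--         free = room
--         while free in occupied:
--             free += 1
--         occupied.add(free)
--         answer.append(free)
--     return answer
-- ===== Notes on version B (the rewrite author's own statement) =====
-- stated objective: simpler
-- what changed: B abandons A's dict of next-pointer chains with path compression entirely: it keeps only a set of occupied rooms and finds the assignment by linearly probing upward from the requested room, which is correct because both compute the smallest unoccupied number >= the request.
import Mathlib
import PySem

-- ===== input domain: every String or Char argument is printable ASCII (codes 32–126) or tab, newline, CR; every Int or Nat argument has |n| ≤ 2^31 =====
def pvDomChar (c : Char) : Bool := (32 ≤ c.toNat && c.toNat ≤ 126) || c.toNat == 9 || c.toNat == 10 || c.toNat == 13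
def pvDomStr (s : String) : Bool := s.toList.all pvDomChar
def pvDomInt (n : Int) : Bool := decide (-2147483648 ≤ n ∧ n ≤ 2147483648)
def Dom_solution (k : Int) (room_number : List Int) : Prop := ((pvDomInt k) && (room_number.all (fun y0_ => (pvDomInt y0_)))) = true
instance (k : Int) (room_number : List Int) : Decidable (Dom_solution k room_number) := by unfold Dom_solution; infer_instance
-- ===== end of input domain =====

-- B replaces A's dict of path-compressed next-pointer chains by a plain set of occupied
-- rooms with an upward linear probe; objective: simpler (no speed claim).

-- ===== PORT A =====
-- the while loop 'while room in room_dict: update_list.append(room); room = room_dict[room]';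
-- the fuel (size+1) is a totality guard only: values always exceed keys, so the chain visits
-- distinct keys and exits within size steps
def chaseA (d : PySem.Dict Int Int) : Int → List Int → Nat → List Int × Int
  | room, upd, 0 => (upd, room)
  | room, upd, fuel+1 =>
    match d.get? room with
    | none => (upd, room)
    | some v => chaseA d v (upd ++ [room]) fuel

def stepA (st : PySem.Dict Int Int × List Int) (room : Int) : PySem.Dict Int Int × List Int :=
  match st.1.get? room with
  | none => (st.1.insert room (room + 1), st.2 ++ [room])
  | some _ =>
    let p := chaseA st.1 room [] (st.1.size + 1)
    let d' := p.1.foldl (fun dd u => dd.insert u (p.2 + 1)) st.1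
    (d'.insert p.2 (p.2 + 1), st.2 ++ [p.2])

def solution (k : Int) (room_number : List Int) : List Int :=
  (room_number.foldl stepA (PySem.Dict.empty, [])).2

-- ===== PORT B =====
-- 'free = room; while free in occupied: free += 1'; the fuel (len+1) is a totality guard
-- only: among len+1 consecutive candidates at least one is outside a len-element set
def probeB (s : PySem.Set Int) : Int → Nat → Int
  | free, 0 => free
  | free, fuel+1 =>
    if PySem.Set.contains s free then probeB s (free + 1) fuel else free

def stepB (st : PySem.Set Int × List Int) (room : Int) : PySem.Set Int × List Int :=
  let free := probeB st.1 room (st.1.length + 1)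
  (PySem.Set.add st.1 free, st.2 ++ [free])

def solution_alt (k : Int) (room_number : List Int) : List Int :=
  (room_number.foldl stepB (PySem.Set.empty, [])).2

-- ===== PRECONDITION & SPEC =====
def Spec_solution (k : Int) (room_number : List Int) (out : List Int) : Prop := out = solution_alt k room_number
instance (k : Int) (room_number : List Int) (out : List Int) : Decidable (Spec_solution k room_number out) := by unfold Spec_solution; infer_instance

-- ===== CLAIM (what is proved, stated in full; the proofs are below) =====
def Claim_equal_solution : Prop := ∀ (k : Int) (room_number : List Int), Dom_solution k room_number → Spec_solution k room_number (solution k room_number)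

-- ===== LEMMAS AND PROOFS =====

-- every value stored exceeds its key (invariant of A's dict)
def Inc (d : PySem.Dict Int Int) : Prop := ∀ x v, d.get? x = some v → x < v

-- density: every room between a key and its stored value is itself a key
def DenseA (d : PySem.Dict Int Int) : Prop :=
  ∀ x v, d.get? x = some v → ∀ y, x ≤ y → y < v → (d.get? y).isSome

-- number of keys ≥ x: the termination measure of a chain walk starting at x
def cGE (d : PySem.Dict Int Int) (x : Int) : Nat :=
  (d.keys.filter (fun a => decide (x ≤ a))).length

-- abstract helper used only to characterise A's chain walk
def frA (d : PySem.Dict Int Int) : Int → Nat → Int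
  | root, 0 => root
  | root, fuel+1 =>
    match d.get? root with
    | none => root
    | some v => frA d v fuel

-- the root of the chain from x (the answer A assigns for query x)
def Res (d : PySem.Dict Int Int) (x : Int) : Int := frA d x (cGE d x)

lemma mem_keys_of_get? {d : PySem.Dict Int Int} {x v : Int} (h : d.get? x = some v) :
    x ∈ d.keys :=
  PySem.Dict.mem_keys_of_mem_items d (PySem.Dict.mem_items_of_get?_eq_some d h)

lemma cGE_pos {d : PySem.Dict Int Int} {x v : Int} (h : d.get? x = some v) :
    0 < cGE d x :=
  List.length_pos_of_mem (List.mem_filter.mpr ⟨mem_keys_of_get? h, by simp⟩)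

lemma filter_length_lt {l : List Int} {p q : Int → Bool} (hpq : ∀ a, p a = true → q a = true)
    {a0 : Int} (h0 : a0 ∈ l) (hq : q a0 = true) (hp : p a0 = false) :
    (l.filter p).length < (l.filter q).length := by
  induction l with
  | nil => cases h0
  | cons b t ih =>
    have hmono : (t.filter p).length ≤ (t.filter q).length :=
      List.Sublist.length_le (List.monotone_filter_right t (by intro a ha; exact hpq a ha))
    rcases List.mem_cons.mp h0 with hb | ht
    · subst hb
      simp only [List.filter_cons, hp, hq]
      simpa using Nat.lt_succ_of_le hmono
    · have := ih ht
      by_cases hpb : p b = true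
      · simp only [List.filter_cons, hpb, hpq b hpb]; simpa using this
      · have hpb' : p b = false := by simpa using hpb
        simp only [List.filter_cons, hpb']
        by_cases hqb : q b = true
        · simp only [hqb]; simp; omega
        · have : q b = false := by simpa using hqb
          simp only [this]; exact ih ht

lemma cGE_lt {d : PySem.Dict Int Int} {x v y : Int} (h : d.get? x = some v) (hxy : x < y) :
    cGE d y < cGE d x := by
  unfold cGE
  exact filter_length_lt (fun a ha => by simp at ha ⊢; omega)
    (mem_keys_of_get? h) (by simp) (by simp; omega)

lemma cGE_le_size (d : PySem.Dict Int Int) (x : Int) : cGE d x ≤ d.size := by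
  unfold cGE
  calc (d.keys.filter _).length ≤ d.keys.length := List.length_filter_le _ _
    _ = d.size := by simp [PySem.Dict.keys, PySem.Dict.size]

lemma frA_none {d : PySem.Dict Int Int} {x : Int} (h : d.get? x = none) :
    ∀ fuel, frA d x fuel = x := by
  intro fuel; cases fuel <;> simp [frA, h]

lemma cGE_eq_zero_get? {d : PySem.Dict Int Int} {x : Int} (h : cGE d x = 0) :
    d.get? x = none := by
  cases hg : d.get? x with
  | none => rfl
  | some v => have := cGE_pos hg; omega

lemma frA_stable {d : PySem.Dict Int Int} (hI : Inc d) :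
    ∀ (c : Nat) (x : Int) (fuel : Nat), cGE d x ≤ c → cGE d x ≤ fuel →
      frA d x fuel = Res d x := by
  intro c
  induction c with
  | zero =>
    intro x fuel hc _
    have hn : d.get? x = none := cGE_eq_zero_get? (Nat.le_zero.mp hc)
    rw [frA_none hn, Res, frA_none hn]
  | succ c ih =>
    intro x fuel hc hf
    cases hg : d.get? x with
    | none => rw [frA_none hg, Res, frA_none hg]
    | some v =>
      have hpos := cGE_pos hg
      obtain ⟨f', rfl⟩ : ∃ f', fuel = f' + 1 := ⟨fuel - 1, by omega⟩
      have hlt : cGE d v < cGE d x := cGE_lt hg (hI x v hg)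
      have h1 : frA d x (f' + 1) = frA d v f' := by simp [frA, hg]
      obtain ⟨c0, hc0⟩ : ∃ c0, cGE d x = c0 + 1 := ⟨cGE d x - 1, by omega⟩
      have h2 : Res d x = frA d v c0 := by
        rw [Res, hc0]; simp [frA, hg]
      rw [h1, h2, ih v f' (by omega) (by omega), ih v c0 (by omega) (by omega)]

lemma Res_none {d : PySem.Dict Int Int} {x : Int} (h : d.get? x = none) : Res d x = x := by
  rw [Res, frA_none h]

lemma Res_some {d : PySem.Dict Int Int} (hI : Inc d) {x v : Int} (h : d.get? x = some v) :
    Res d x = Res d v := by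
  obtain ⟨c0, hc0⟩ : ∃ c0, cGE d x = c0 + 1 := ⟨cGE d x - 1, by have := cGE_pos h; omega⟩
  have hlt : cGE d v < cGE d x := cGE_lt h (hI x v h)
  rw [Res, hc0]
  simp only [frA, h]
  exact frA_stable hI c0 v c0 (by omega) (by omega)

lemma Res_ge_aux {d : PySem.Dict Int Int} (hI : Inc d) :
    ∀ (c : Nat) (x : Int), cGE d x ≤ c → x ≤ Res d x := by
  intro c
  induction c with
  | zero => intro x hc; rw [Res_none (cGE_eq_zero_get? (Nat.le_zero.mp hc))]
  | succ c ih =>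
    intro x _
    cases hg : d.get? x with
    | none => rw [Res_none hg]
    | some v =>
      have hlt : cGE d v < cGE d x := cGE_lt hg (hI x v hg)
      have := ih v (by omega)
      rw [Res_some hI hg]
      have := hI x v hg
      omega

lemma Res_ge {d : PySem.Dict Int Int} (hI : Inc d) (x : Int) : x ≤ Res d x :=
  Res_ge_aux hI (cGE d x) x le_rfl

lemma Res_gt {d : PySem.Dict Int Int} (hI : Inc d) {x v : Int} (h : d.get? x = some v) :
    x < Res d x := by
  rw [Res_some hI h]
  have := Res_ge hI v
  have := hI x v h
  omega

lemma Res_not_key_aux {d : PySem.Dict Int Int} (hI : Inc d) :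
    ∀ (c : Nat) (x : Int), cGE d x ≤ c → d.get? (Res d x) = none := by
  intro c
  induction c with
  | zero =>
    intro x hc
    have hn := cGE_eq_zero_get? (Nat.le_zero.mp hc)
    rw [Res_none hn]; exact hn
  | succ c ih =>
    intro x _
    cases hg : d.get? x with
    | none => rw [Res_none hg]; exact hg
    | some v =>
      have hlt : cGE d v < cGE d x := cGE_lt hg (hI x v hg)
      rw [Res_some hI hg]
      exact ih v (by omega)

lemma Res_not_key {d : PySem.Dict Int Int} (hI : Inc d) (x : Int) :
    d.get? (Res d x) = none :=
  Res_not_key_aux hI (cGE d x) x le_rfl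

-- in a dense dict, every room between x and its chain root is a key
lemma dense_interval {d : PySem.Dict Int Int} (hI : Inc d) (hD : DenseA d) :
    ∀ (c : Nat) (x : Int), cGE d x ≤ c →
      ∀ y, x ≤ y → y < Res d x → (d.get? y).isSome := by
  intro c
  induction c with
  | zero =>
    intro x hc y hy1 hy2
    rw [Res_none (cGE_eq_zero_get? (Nat.le_zero.mp hc))] at hy2
    omega
  | succ c ih =>
    intro x _ y hy1 hy2
    cases hg : d.get? x with
    | none => rw [Res_none hg] at hy2; omega
    | some v =>
      have hlt : cGE d v < cGE d x := cGE_lt hg (hI x v hg)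
      by_cases hyv : y < v
      · exact hD x v hg y hy1 hyv
      · rw [Res_some hI hg] at hy2
        exact ih v (by omega) y (by omega) hy2

-- A's chain walk reaches the root and visits only keys resolving to it
lemma chase_spec {d : PySem.Dict Int Int} (hI : Inc d) :
    ∀ (fuel : Nat) (x : Int) (acc : List Int), cGE d x ≤ fuel →
      (chaseA d x acc fuel).2 = Res d x ∧
      ∀ u ∈ (chaseA d x acc fuel).1, u ∈ acc ∨ ((d.get? u).isSome ∧ Res d u = Res d x) := by
  intro fuel
  induction fuel with
  | zero =>
    intro x acc hc
    have hn := cGE_eq_zero_get? (Nat.le_zero.mp hc)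
    refine ⟨by simp [chaseA, Res_none hn], fun u hu => Or.inl (by simpa [chaseA] using hu)⟩
  | succ fuel ih =>
    intro x acc hc
    cases hg : d.get? x with
    | none =>
      refine ⟨by simp [chaseA, hg, Res_none hg], fun u hu => Or.inl (by simpa [chaseA, hg] using hu)⟩
    | some v =>
      have hlt : cGE d v < cGE d x := cGE_lt hg (hI x v hg)
      have hstep : chaseA d x acc (fuel + 1) = chaseA d v (acc ++ [x]) fuel := by
        simp [chaseA, hg]
      obtain ⟨h1, h2⟩ := ih v (acc ++ [x]) (by omega)
      have hRx : Res d x = Res d v := Res_some hI hg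
      refine ⟨by rw [hstep, h1, hRx], fun u hu => ?_⟩
      rw [hstep] at hu
      rcases h2 u hu with hmem | ⟨hs, hR⟩
      · rcases List.mem_append.mp hmem with h | h
        · exact Or.inl h
        · have : u = x := by simpa using h
          exact Or.inr ⟨by simp [this, hg], by rw [this]⟩
      · exact Or.inr ⟨hs, by rw [hR, hRx]⟩

lemma foldl_insert_get? (w : Int) :
    ∀ (l : List Int) (d : PySem.Dict Int Int) (y : Int),
      ((l.foldl (fun dd u => dd.insert u w) d).get? y) =
        if y ∈ l then some w else d.get? y := by
  intro l
  induction l with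
  | nil => intro d y; simp
  | cons a t ih =>
    intro d y
    rw [List.foldl_cons, ih]
    by_cases hyt : y ∈ t
    · simp [hyt]
    · by_cases hya : y = a
      · simp [hya, PySem.Dict.get?_insert_self]
      · simp [hyt, hya, PySem.Dict.get?_insert _ _ _ _]

-- one step of A: the answer is Res, invariants survive, keys grow by exactly {Res d room}
lemma stepA_spec {d : PySem.Dict Int Int} (ans : List Int) (room : Int)
    (hI : Inc d) (hD : DenseA d) :
    (stepA (d, ans) room).2 = ans ++ [Res d room] ∧ Inc (stepA (d, ans) room).1 ∧
    DenseA (stepA (d, ans) room).1 ∧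
    ∀ y, ((stepA (d, ans) room).1.get? y).isSome ↔ ((d.get? y).isSome ∨ y = Res d room) := by
  cases hg : d.get? room with
  | none =>
    have hstep : stepA (d, ans) room = (d.insert room (room + 1), ans ++ [room]) := by
      simp only [stepA, hg]
    have hRr : Res d room = room := Res_none hg
    have hget : ∀ y, (d.insert room (room + 1)).get? y =
        if y = room then some (room + 1) else d.get? y := by
      intro y; rw [PySem.Dict.get?_insert]
    refine ⟨by rw [hstep, hRr], ?_, ?_, ?_⟩
    · rw [hstep]
      intro y w hy
      rw [hget] at hy
      by_cases hyr : y = room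
      · rw [if_pos hyr] at hy; cases hy; omega
      · rw [if_neg hyr] at hy; exact hI y w hy
    · rw [hstep]
      intro x v hx y hy1 hy2
      rw [hget]
      by_cases hyr : y = room
      · simp [hyr]
      · rw [if_neg hyr]
        rw [hget] at hx
        by_cases hxr : x = room
        · rw [if_pos hxr] at hx; cases hx; omega
        · rw [if_neg hxr] at hx; exact hD x v hx y hy1 hy2
    · intro y
      rw [hstep, hRr]
      simp only [hget]
      by_cases hyr : y = room
      · simp [hyr]
      · simp [hyr]
  | some v =>
    set p := chaseA d room [] (d.size + 1) with hp
    set D := p.1.foldl (fun dd u => dd.insert u (p.2 + 1)) d with hD'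
    have hstep : stepA (d, ans) room = (D.insert p.2 (p.2 + 1), ans ++ [p.2]) := by
      simp only [stepA, hg, hp, hD']
    obtain ⟨hfree, hmem⟩ := chase_spec hI (d.size + 1) room []
      (le_trans (cGE_le_size d room) (by omega))
    rw [← hp] at hfree hmem
    have hmem' : ∀ u ∈ p.1, (d.get? u).isSome ∧ Res d u = Res d room := by
      intro u hu
      rcases hmem u hu with h | h
      · cases h
      · exact h
    have hget : ∀ y, (D.insert p.2 (p.2 + 1)).get? y =
        if y = p.2 then some (p.2 + 1) else if y ∈ p.1 then some (p.2 + 1) else d.get? y := by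
      intro y
      rw [PySem.Dict.get?_insert, hD', foldl_insert_get?]
    have hRmem : ∀ u ∈ p.1, u < p.2 := by
      intro u hu
      obtain ⟨hs, hRu⟩ := hmem' u hu
      obtain ⟨w', hw'⟩ := Option.isSome_iff_exists.mp hs
      have := Res_gt hI hw'
      rw [hRu, ← hfree] at this
      omega
    have hIsome : ∀ y, ((D.insert p.2 (p.2 + 1)).get? y).isSome ↔
        ((d.get? y).isSome ∨ y = Res d room) := by
      intro y
      rw [hget, ← hfree]
      by_cases hyf : y = p.2
      · simp [hyf]
      · by_cases hyl : y ∈ p.1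
        · simp [hyf, hyl, (hmem' y hyl).1]
        · simp [hyf, hyl]
    have hInew : Inc (D.insert p.2 (p.2 + 1)) := by
      intro y w hy
      rw [hget y] at hy
      by_cases hyf : y = p.2
      · rw [if_pos hyf] at hy; cases hy; omega
      · rw [if_neg hyf] at hy
        by_cases hyl : y ∈ p.1
        · rw [if_pos hyl] at hy
          cases hy
          have := hRmem y hyl
          omega
        · rw [if_neg hyl] at hy; exact hI y w hy
    refine ⟨by rw [hstep, ← hfree], by rw [hstep]; exact hInew, ?_, by rw [hstep]; exact hIsome⟩
    rw [hstep]
    intro x w hx y hy1 hy2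
    rw [hIsome y]
    rw [hget] at hx
    by_cases hxf : x = p.2
    · rw [if_pos hxf] at hx
      cases hx
      right; rw [← hfree]; omega
    · rw [if_neg hxf] at hx
      by_cases hxl : x ∈ p.1
      · rw [if_pos hxl] at hx
        cases hx
        by_cases hyp : y = p.2
        · right; rw [← hfree]; exact hyp
        · left
          obtain ⟨hs, hRx⟩ := hmem' x hxl
          have hylt : y < Res d x := by
            rw [hRx, ← hfree]; omega
          exact dense_interval hI hD (cGE d x) x le_rfl y hy1 hylt
      · rw [if_neg hxl] at hx
        exact Or.inl (hD x w hx y hy1 hy2)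

-- number of set members ≥ x: the termination measure of B's probe
def mGE (s : List Int) (x : Int) : Nat :=
  (s.filter (fun a => decide (x ≤ a))).length

-- B's probe returns the first value ≥ free outside the set
lemma probe_spec (s : PySem.Set Int) :
    ∀ (fuel : Nat) (free : Int), mGE s free ≤ fuel →
      free ≤ probeB s free fuel ∧ probeB s free fuel ∉ s ∧
      ∀ y, free ≤ y → y < probeB s free fuel → y ∈ s := by
  intro fuel
  induction fuel with
  | zero =>
    intro free hc
    have hnot : free ∉ s := by
      intro hmem
      have : 0 < mGE s free :=
        List.length_pos_of_mem (List.mem_filter.mpr ⟨hmem, by simp⟩)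
      omega
    have hstep : probeB s free 0 = free := rfl
    exact ⟨by rw [hstep], by rw [hstep]; exact hnot, fun y hy1 hy2 => by rw [hstep] at hy2; omega⟩
  | succ fuel ih =>
    intro free hc
    by_cases hmem : free ∈ s
    · have hcon : PySem.Set.contains s free = true := (PySem.Set.contains_iff s free).mpr hmem
      have hstep : probeB s free (fuel + 1) = probeB s (free + 1) fuel := by
        simp only [probeB, hcon, if_true]
      have hlt : mGE s (free + 1) < mGE s free :=
        filter_length_lt (fun a ha => by simp at ha ⊢; omega) hmem (by simp) (by simp)
      obtain ⟨h1, h2, h3⟩ := ih (free + 1) (by omega)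
      refine ⟨by rw [hstep]; omega, by rw [hstep]; exact h2, fun y hy1 hy2 => ?_⟩
      rw [hstep] at hy2
      by_cases hyf : y = free
      · exact hyf ▸ hmem
      · exact h3 y (by omega) hy2
    · have hcon : PySem.Set.contains s free = false := by
        by_contra h
        exact hmem ((PySem.Set.contains_iff s free).mp (by simpa using h))
      have hstep : probeB s free (fuel + 1) = free := by
        simp only [probeB, hcon, Bool.false_eq_true, if_false]
      exact ⟨by rw [hstep], by rw [hstep]; exact hmem, fun y hy1 hy2 => by rw [hstep] at hy2; omega⟩

-- two "first free ≥ r" values for the same occupancy predicate coincide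
lemma minfree_unique {P : Int → Prop} {r a b : Int}
    (ha1 : r ≤ a) (ha2 : ¬ P a) (ha3 : ∀ y, r ≤ y → y < a → P y)
    (hb1 : r ≤ b) (hb2 : ¬ P b) (hb3 : ∀ y, r ≤ y → y < b → P y) : a = b := by
  by_contra hne
  rcases lt_or_gt_of_ne hne with h | h
  · exact ha2 (hb3 a ha1 h)
  · exact hb2 (ha3 b hb1 h)

lemma mGE_le_length (s : List Int) (x : Int) : mGE s x ≤ s.length :=
  List.length_filter_le _ _

-- the main loop: A's dict keys and B's set stay in sync and produce the same answers
lemma main_loop :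
    ∀ (rooms : List Int) (dA : PySem.Dict Int Int) (sB : PySem.Set Int) (ans : List Int),
      Inc dA → DenseA dA → (∀ x, (dA.get? x).isSome ↔ x ∈ sB) →
      (rooms.foldl stepA (dA, ans)).2 = (rooms.foldl stepB (sB, ans)).2 := by
  intro rooms
  induction rooms with
  | nil => intro dA sB ans _ _ _; rfl
  | cons r t ih =>
    intro dA sB ans hI hD hsync
    obtain ⟨hA2, hIA', hDA', hkeys⟩ := stepA_spec ans r hI hD
    obtain ⟨hp1, hp2, hp3⟩ := probe_spec sB (sB.length + 1) r
      (le_trans (mGE_le_length sB r) (by omega))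
    have hans : Res dA r = probeB sB r (sB.length + 1) := by
      refine minfree_unique (P := fun y => y ∈ sB)
        (Res_ge hI r) ?_ ?_ hp1 hp2 hp3
      · show Res dA r ∉ sB
        rw [← hsync]
        simp [Res_not_key hI r]
      · intro y hy1 hy2
        show y ∈ sB
        rw [← hsync]
        exact dense_interval hI hD (cGE dA r) r le_rfl y hy1 hy2
    have hpairA : stepA (dA, ans) r = ((stepA (dA, ans) r).1, ans ++ [Res dA r]) := by
      rw [← hA2]
    have hpairB : stepB (sB, ans) r =
        (PySem.Set.add sB (Res dA r), ans ++ [Res dA r]) := by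
      simp only [stepB, ← hans]
    rw [List.foldl_cons, List.foldl_cons, hpairA, hpairB]
    apply ih _ _ _ hIA' hDA'
    intro x
    rw [hkeys x, hsync x, PySem.Set.mem_add]

-- ===== VERDICT (by name: the statement is the Claim_ definition above) =====
theorem solution_spec : Claim_equal_solution := by
  intro k room_number _
  unfold Spec_solution solution solution_alt
  exact main_loop room_number _ _ []
    (fun x v h => by simp [PySem.Dict.get?_empty] at h)
    (fun x v h => by simp [PySem.Dict.get?_empty] at h)
    (fun x => by simp [PySem.Dict.get?_empty, PySem.Set.empty])
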